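-- pv_equiv track=rewrite | github.com/BeckyLashua/algorithms | paliodrome.py | checkPalindrome_2
-- ===== SOURCE A (Python) =====
-- def checkPalindrome_2(string, k):
--     dp = [[0 for x in range(len(string) + 1)] for y in range(len(string) + 1)]
--
--     reversed_str = string[::-1]
--
--     for i in range(0, len(string) + 1):
--         for j in range(0, len(string) + 1):
--             if i == False:
--                 dp[i][j] = j
--             elif j == False:
--                 dp[i][j] = i
--             elif string[i-1] == reversed_str[j-1]:
--                 dp[i][j] = dp[i-1][j-1]
--             else:
--                 dp[i][j] = 1 + min(dp[i-1][j], dp[i][j-1])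
--     return dp[len(string)][len(string)] <= (k * 2)
-- ===== SOURCE B (Python) =====
-- def checkPalindrome_2(string, k):
--     # Longest common subsequence of string and its reverse, kept as a rolling 1-D row.
--     r = string[::-1]
--     n = len(string)
--     prev = [0] * (n + 1)
--     for ch in string:
--         cur = [0]
--         for j in range(1, n + 1):
--             if ch == r[j - 1]:
--                 cur.append(prev[j - 1] + 1)
--             else:
--                 cur.append(max(prev[j], cur[j - 1]))
--         prev = cur
--     return 2 * (n - prev[n]) <= 2 * k
-- ===== Notes on version B (the rewrite author's own statement) =====
-- stated objective: alternative
-- what changed: Replaces A's full (n+1) x (n+1) min-edit-distance table between the string and its reverse by a rolling one-row LCS computation (longest common subsequence of the string with its reverse), using the identity edit-distance = 2*(n - LCS); O(n) memory instead of O(n^2) and a max-recurrence instead of A's min-recurrence.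
import Mathlib
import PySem

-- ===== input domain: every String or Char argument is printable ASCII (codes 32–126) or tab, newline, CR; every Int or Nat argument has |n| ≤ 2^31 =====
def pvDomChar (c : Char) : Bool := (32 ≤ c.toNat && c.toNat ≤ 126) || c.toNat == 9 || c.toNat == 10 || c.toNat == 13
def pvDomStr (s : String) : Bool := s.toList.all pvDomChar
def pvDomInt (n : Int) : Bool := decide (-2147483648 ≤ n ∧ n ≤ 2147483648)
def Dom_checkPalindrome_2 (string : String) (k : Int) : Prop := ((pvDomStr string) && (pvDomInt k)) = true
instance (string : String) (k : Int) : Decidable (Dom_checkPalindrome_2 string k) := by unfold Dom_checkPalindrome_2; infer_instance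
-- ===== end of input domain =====

-- B replaces A's (n+1)×(n+1) min-edit-distance table by a rolling 1-D row computing the
-- LCS of the string with its reverse (objective: alternative — O(n) memory, one row at a time).

-- ===== PORT A =====
-- dp[i][j] reads/writes: all indices are nonnegative and in range, so Nat indexing with
-- getD/set is exact for Python's dp[i][j]; string[::-1] is List.reverse (exact).
def pvGet2 (dp : List (List Int)) (i j : Nat) : Int := (dp.getD i []).getD j 0
def pvSet2 (dp : List (List Int)) (i j : Nat) (v : Int) : List (List Int) :=
  dp.set i ((dp.getD i []).set j v)

def pvStepA (cs rs : List Char) (dp : List (List Int)) (i j : Nat) : List (List Int) :=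
  if i = 0 then pvSet2 dp i j (j : Int)
  else if j = 0 then pvSet2 dp i j (i : Int)
  else if cs.getD (i-1) ' ' == rs.getD (j-1) ' ' then pvSet2 dp i j (pvGet2 dp (i-1) (j-1))
  else pvSet2 dp i j (1 + min (pvGet2 dp (i-1) j) (pvGet2 dp i (j-1)))

def checkPalindrome_2 (string : String) (k : Int) : Bool :=
  let cs := string.toList
  let n := cs.length
  let dp0 : List (List Int) :=
    (List.range (n+1)).map (fun _ => (List.range (n+1)).map (fun _ => (0:Int)))
  let rs := cs.reverse
  let dp := (List.range (n+1)).foldl (fun dp i =>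
      (List.range (n+1)).foldl (fun dp j => pvStepA cs rs dp i j) dp) dp0
  decide (pvGet2 dp n n ≤ k * 2)

-- ===== PORT B =====
def checkPalindrome_2_alt (string : String) (k : Int) : Bool :=
  let cs := string.toList
  let n := cs.length
  let r := cs.reverse
  let prev := cs.foldl (fun prev ch =>
      (List.range' 1 n).foldl (fun cur j =>
        cur ++ [if ch == r.getD (j-1) ' ' then prev.getD (j-1) 0 + 1
                else max (prev.getD j 0) (cur.getD (j-1) 0)]) [(0:Int)])
    (List.replicate (n+1) (0:Int))
  decide (2 * ((n : Int) - prev.getD n 0) ≤ 2 * k)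

-- ===== PRECONDITION & SPEC =====
def Spec_checkPalindrome_2 (string : String) (k : Int) (out : Bool) : Prop := out = checkPalindrome_2_alt string k
instance (string : String) (k : Int) (out : Bool) : Decidable (Spec_checkPalindrome_2 string k out) := by unfold Spec_checkPalindrome_2; infer_instance

-- ===== CLAIM (what is proved, stated in full; the proofs are below) =====
def Claim_equal_checkPalindrome_2 : Prop := ∀ (string : String) (k : Int), Dom_checkPalindrome_2 string k → Spec_checkPalindrome_2 string k (checkPalindrome_2 string k)

-- ===== LEMMAS AND PROOFS =====

-- Reference recursion for A's table: insert/delete edit distance on prefixes.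
def refD (a b : List Char) : Nat → Nat → Int
  | 0, j => (j : Int)
  | i+1, 0 => ((i : Int) + 1)
  | i+1, j+1 =>
      if a.getD i ' ' == b.getD j ' ' then refD a b i j
      else 1 + min (refD a b i (j+1)) (refD a b (i+1) j)
termination_by i j => i + j

-- Reference recursion for B's rows: LCS length on prefixes.
def refL (a b : List Char) : Nat → Nat → Int
  | 0, _ => 0
  | _+1, 0 => 0
  | i+1, j+1 =>
      if a.getD i ' ' == b.getD j ' ' then refL a b i j + 1
      else max (refL a b i (j+1)) (refL a b (i+1) j)
termination_by i j => i + j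

theorem refD_eq (a b : List Char) : ∀ i j, refD a b i j = (i : Int) + (j : Int) - 2 * refL a b i j
  | 0, j => by simp [refD, refL]
  | i+1, 0 => by simp [refD, refL]
  | i+1, j+1 => by
      have h1 := refD_eq a b i j
      have h2 := refD_eq a b i (j+1)
      have h3 := refD_eq a b (i+1) j
      by_cases hc : a.getD i ' ' == b.getD j ' '
      · simp only [refD, refL, hc, if_true]; omega
      · simp only [refD, refL, hc, if_false, Bool.false_eq_true]; omega
termination_by i j => i + j

theorem getD_set_eq' {α : Type} (l : List α) (i : Nat) (v d : α) (h : i < l.length) :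
    (l.set i v).getD i d = v := by
  simp [List.getD_eq_getElem?_getD, List.getElem?_set_self', List.getElem?_eq_getElem h]

theorem getD_set_ne' {α : Type} (l : List α) {i j : Nat} (h : i ≠ j) (v d : α) :
    (l.set i v).getD j d = l.getD j d := by
  simp [List.getD_eq_getElem?_getD, List.getElem?_set_ne h]

theorem getD_map_range {α : Type} (f : Nat → α) (m j : Nat) (d : α) :
    ((List.range m).map f).getD j d = if j < m then f j else d := by
  rcases Nat.lt_or_ge j m with h | h
  · rw [List.getD_eq_getElem _ _ (by simpa using h)]; simp [h]
  · rw [List.getD_eq_default _ _ (by simpa using h)]; simp [Nat.not_lt.2 h]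

def pvFilled (i j a b : Nat) : Bool := decide (a < i ∨ (a = i ∧ b < j))

def InvA (cs rs : List Char) (n : Nat) (dp : List (List Int)) (i j : Nat) : Prop :=
  dp.length = n+1 ∧ (∀ r, r ≤ n → (dp.getD r []).length = n+1) ∧
  (∀ a b, a ≤ n → b ≤ n → pvGet2 dp a b = if pvFilled i j a b then refD cs rs a b else 0)

theorem pvGet2_set_self (dp : List (List Int)) (i j : Nat) (v : Int)
    (hi : i < dp.length) (hj : j < (dp.getD i []).length) :
    pvGet2 (pvSet2 dp i j v) i j = v := by
  unfold pvGet2 pvSet2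
  rw [getD_set_eq' _ _ _ _ hi, getD_set_eq' _ _ _ _ hj]

theorem pvGet2_set_other (dp : List (List Int)) (i j : Nat) (v : Int) (a b : Nat)
    (hne : ¬(a = i ∧ b = j)) (hi : i < dp.length) :
    pvGet2 (pvSet2 dp i j v) a b = pvGet2 dp a b := by
  unfold pvGet2 pvSet2
  by_cases hai : a = i
  · subst hai
    have hbj : j ≠ b := fun h => hne ⟨rfl, h.symm⟩
    rw [getD_set_eq' _ _ _ _ hi, getD_set_ne' _ hbj]
  · rw [getD_set_ne' _ (fun h => hai h.symm)]

theorem pvSet2_length (dp : List (List Int)) (i j : Nat) (v : Int) :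
    (pvSet2 dp i j v).length = dp.length := by simp [pvSet2]

theorem pvSet2_row_length (dp : List (List Int)) (i j : Nat) (v : Int) (r : Nat)
    (hi : i < dp.length) :
    ((pvSet2 dp i j v).getD r []).length = (dp.getD r []).length := by
  unfold pvSet2
  by_cases h : i = r
  · subst h; rw [getD_set_eq' _ _ _ _ hi]; simp
  · rw [getD_set_ne' _ h]

theorem stepA_inv (cs rs : List Char) (n : Nat) (dp : List (List Int)) (i j : Nat)
    (hi : i ≤ n) (hj : j ≤ n) (hinv : InvA cs rs n dp i j) :
    InvA cs rs n (pvStepA cs rs dp i j) i (j+1) := by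
  obtain ⟨hlen, hrow, hval⟩ := hinv
  have hiL : i < dp.length := by omega
  have hjL : j < (dp.getD i []).length := by rw [hrow i hi]; omega
  have hwrite : pvStepA cs rs dp i j = pvSet2 dp i j (refD cs rs i j) := by
    unfold pvStepA
    rcases i with _ | s
    · simp [refD]
    · rcases j with _ | t
      · simp [refD]
      · simp only [Nat.succ_ne_zero, if_false, Nat.add_sub_cancel]
        by_cases hc : cs.getD s ' ' == rs.getD t ' '
        · rw [if_pos hc]
          rw [hval s t (by omega) (by omega),
            if_pos (by unfold pvFilled; exact decide_eq_true (by omega))]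
          simp only [refD]
          rw [if_pos hc]
        · rw [if_neg hc]
          rw [hval s (t+1) (by omega) (by omega), hval (s+1) t (by omega) (by omega),
            if_pos (by unfold pvFilled; exact decide_eq_true (by omega)), if_pos (by unfold pvFilled; exact decide_eq_true (by omega))]
          simp only [refD]
          rw [if_neg hc]
  rw [hwrite]
  refine ⟨by rw [pvSet2_length]; exact hlen,
    fun r hr => by rw [pvSet2_row_length _ _ _ _ _ hiL]; exact hrow r hr, ?_⟩
  intro a b ha hb
  by_cases hab : a = i ∧ b = j
  · obtain ⟨rfl, rfl⟩ := hab
    rw [pvGet2_set_self _ _ _ _ hiL hjL, if_pos (by simp [pvFilled])]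
  · rw [pvGet2_set_other _ _ _ _ _ _ hab hiL, hval a b ha hb]
    have hx : a ≠ i ∨ b ≠ j := by tauto
    rw [show pvFilled i (j+1) a b = pvFilled i j a b from by
      unfold pvFilled; rw [decide_eq_decide]; omega]

theorem innerA (cs rs : List Char) (n i : Nat) (hi : i ≤ n) :
    ∀ m, m ≤ n+1 → ∀ dp, InvA cs rs n dp i 0 →
    InvA cs rs n ((List.range m).foldl (fun dp j => pvStepA cs rs dp i j) dp) i m := by
  intro m
  induction m with
  | zero => intro _ dp h0; simpa using h0
  | succ m ih =>
      intro hm dp h0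
      rw [List.range_succ, List.foldl_append]
      simp only [List.foldl_cons, List.foldl_nil]
      exact stepA_inv cs rs n _ i m hi (by omega) (ih (by omega) dp h0)

theorem shiftA (cs rs : List Char) (n : Nat) (dp : List (List Int)) (i : Nat)
    (h : InvA cs rs n dp i (n+1)) : InvA cs rs n dp (i+1) 0 := by
  obtain ⟨h1, h2, h3⟩ := h
  refine ⟨h1, h2, fun a b ha hb => ?_⟩
  rw [h3 a b ha hb,
    show pvFilled i (n+1) a b = pvFilled (i+1) 0 a b from by
      unfold pvFilled; rw [decide_eq_decide]; omega]

theorem initA (cs rs : List Char) (n : Nat) :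
    InvA cs rs n ((List.range (n+1)).map (fun _ => (List.range (n+1)).map (fun _ => (0:Int)))) 0 0 := by
  refine ⟨by simp, fun r hr => ?_, fun a b ha hb => ?_⟩
  · rw [getD_map_range, if_pos (by omega)]; simp
  · unfold pvGet2
    rw [getD_map_range, if_pos (by omega), getD_map_range, if_pos (by omega),
      if_neg (by simp [pvFilled])]

theorem outerA (cs rs : List Char) (n : Nat)
    (dp0 : List (List Int)) (h0 : InvA cs rs n dp0 0 0) : ∀ m, m ≤ n+1 →
    InvA cs rs n ((List.range m).foldl (fun dp i =>
      (List.range (n+1)).foldl (fun dp j => pvStepA cs rs dp i j) dp) dp0) m 0 := by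
  intro m
  induction m with
  | zero => intro _; simpa using h0
  | succ m ih =>
      intro hm
      rw [show List.range (m+1) = List.range m ++ [m] from List.range_succ, List.foldl_append]
      simp only [List.foldl_cons, List.foldl_nil]
      exact shiftA cs rs n _ m (innerA cs rs n m (by omega) (n+1) le_rfl _ (ih (by omega)))

theorem A_char (string : String) (k : Int) :
    checkPalindrome_2 string k =
      decide (refD string.toList string.toList.reverse string.toList.length string.toList.length ≤ k * 2) := by
  simp only [checkPalindrome_2]
  obtain ⟨-, -, h3⟩ :=
    outerA string.toList string.toList.reverse string.toList.length _
      (initA string.toList string.toList.reverse string.toList.length)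
      (string.toList.length + 1) le_rfl
  rw [h3 string.toList.length string.toList.length le_rfl le_rfl,
    if_pos (by simp [pvFilled])]

def rowOf (cs : List Char) (n t : Nat) : List Int :=
  (List.range (n+1)).map (fun j => refL cs cs.reverse t j)

theorem innerB (cs : List Char) (n : Nat) (t : Nat) : ∀ m, m ≤ n →
    (List.range' 1 m).foldl (fun cur j =>
        cur ++ [if cs.getD t ' ' == cs.reverse.getD (j-1) ' ' then (rowOf cs n t).getD (j-1) 0 + 1
                else max ((rowOf cs n t).getD j 0) (cur.getD (j-1) 0)]) [(0:Int)]
      = (List.range (m+1)).map (fun j => refL cs cs.reverse (t+1) j) := by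
  intro m
  induction m with
  | zero => simp [refL]
  | succ m ih =>
      intro hm
      rw [show List.range' 1 (m+1) = List.range' 1 m ++ [1+m] from by
          simpa using List.range'_concat (s := 1) (n := m) (step := 1),
        List.foldl_append]
      simp only [List.foldl_cons, List.foldl_nil]
      rw [ih (by omega)]
      have hm1 : 1 + m - 1 = m := by omega
      rw [hm1]
      have e1 : (rowOf cs n t).getD m 0 = refL cs cs.reverse t m := by
        unfold rowOf; rw [getD_map_range, if_pos (by omega)]
      have e2 : (rowOf cs n t).getD (1+m) 0 = refL cs cs.reverse t (m+1) := by
        unfold rowOf; rw [getD_map_range, if_pos (by omega), Nat.add_comm 1 m]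
      have e3 : ((List.range (m+1)).map (fun j => refL cs cs.reverse (t+1) j)).getD m 0
          = refL cs cs.reverse (t+1) m := by
        rw [getD_map_range, if_pos (by omega)]
      rw [e1, e2, e3,
        show List.range (m+1+1) = List.range (m+1) ++ [m+1] from List.range_succ,
        List.map_append]
      congr 1
      simp only [List.map_cons, List.map_nil]
      rw [show refL cs cs.reverse (t+1) (m+1) =
          if cs.getD t ' ' == cs.reverse.getD m ' ' then refL cs cs.reverse t m + 1
          else max (refL cs cs.reverse t (m+1)) (refL cs cs.reverse (t+1) m) from by
        simp only [refL]]

theorem outerB (cs : List Char) : ∀ t, t ≤ cs.length →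
    (cs.take t).foldl (fun prev ch =>
      (List.range' 1 cs.length).foldl (fun cur j =>
        cur ++ [if ch == cs.reverse.getD (j-1) ' ' then prev.getD (j-1) 0 + 1
                else max (prev.getD j 0) (cur.getD (j-1) 0)]) [(0:Int)])
      (List.replicate (cs.length+1) (0:Int)) = rowOf cs cs.length t := by
  intro t
  induction t with
  | zero =>
      intro _
      simp only [List.take_zero, List.foldl_nil, rowOf]
      rw [show (fun j => refL cs cs.reverse 0 j) = (fun _ : Nat => (0:Int)) from by
        funext j; simp [refL]]
      simp [List.map_const']
  | succ t ih =>
      intro ht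
      have htl : t < cs.length := by omega
      rw [show cs.take (t+1) = cs.take t ++ [cs[t]] from by
          rw [List.take_add_one, List.getElem?_eq_getElem htl]; rfl,
        List.foldl_append, ih (by omega)]
      simp only [List.foldl_cons, List.foldl_nil]
      rw [show cs[t] = cs.getD t ' ' from (List.getD_eq_getElem cs ' ' htl).symm]
      exact innerB cs cs.length t cs.length le_rfl

theorem B_char (string : String) (k : Int) :
    checkPalindrome_2_alt string k =
      decide (2 * ((string.toList.length : Int) -
        refL string.toList string.toList.reverse string.toList.length string.toList.length) ≤ 2 * k) := by
  simp only [checkPalindrome_2_alt]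
  have h := outerB string.toList string.toList.length le_rfl
  rw [List.take_length] at h
  rw [h]
  unfold rowOf
  rw [getD_map_range, if_pos (by omega)]

-- ===== VERDICT (by name: the statement is the Claim_ definition above) =====
theorem checkPalindrome_2_spec : Claim_equal_checkPalindrome_2 := by
  intro s k _
  unfold Spec_checkPalindrome_2
  rw [A_char, B_char, decide_eq_decide]
  have := refD_eq s.toList s.toList.reverse s.toList.length s.toList.length
  omega
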